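-- pv_equiv track=rewrite | github.com/Pythonsy/Null | Python/CodeCademy/Test011/object02.py | make_mass
-- ===== SOURCE A (Python) =====
-- def make_mass(x):
--     result = [[j * 0 for j in range(x)] for mass in range(x)]
--
--     for i in range(x):
--         result[i][i] = i + 1
--
--     i = x - 1
--     j = 0
--     while j < x:
--         result[i][j] = x + j + 1
--         j += 1
--         i -= 1
--
--     temp = result[0][x - 1]
--     backrow, frontcolumn, lowrow, backcolumn = (0, 0, x - 1, x - 1)
--     myrange = int(x / 2)
--
--     for i in range(myrange):
--         for numb in result[backrow][::-1]:
--             if numb == 0: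
--                 numb = temp
--                 temp += 1
--
--     return result
-- ===== SOURCE B (Python) =====
-- def make_mass(x):
--     return [[x + c + 1 if r + c == x - 1 else (r + 1 if r == c else 0)
--              for c in range(x)]
--             for r in range(x)]
-- ===== Notes on version B (the rewrite author's own statement) =====
-- stated objective: simpler
-- what changed: Replaces the three mutation phases (zero fill, diagonal pass, anti-diagonal while loop) and the dead trailing loop by one nested comprehension deciding each cell with a closed form (anti-diagonal tested before main diagonal to match A's overwrite order).
-- outside the precondition, e.g. on make_mass(0): A raises IndexError, B returns []
import Mathlib
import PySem

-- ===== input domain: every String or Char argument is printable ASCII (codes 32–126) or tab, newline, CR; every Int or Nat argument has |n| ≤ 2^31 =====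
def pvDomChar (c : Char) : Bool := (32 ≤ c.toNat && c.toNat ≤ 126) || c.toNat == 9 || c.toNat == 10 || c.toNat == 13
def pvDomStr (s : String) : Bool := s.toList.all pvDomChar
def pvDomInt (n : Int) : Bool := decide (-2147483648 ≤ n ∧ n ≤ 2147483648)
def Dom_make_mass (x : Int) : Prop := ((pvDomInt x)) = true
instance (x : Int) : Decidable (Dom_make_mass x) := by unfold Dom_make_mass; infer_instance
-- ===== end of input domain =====

-- B replaces A's three mutation phases and dead trailing loop by one closed-form nested comprehension (simpler).

-- ===== PORT A =====
-- result[i][j] = v  on a list-of-lists (indices are nonnegative in A's actual use)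
def pvSetCell (m : List (List Int)) (i j v : Int) : List (List Int) :=
  m.set i.toNat ((m.getD i.toNat []).set j.toNat v)

-- the 'while j < x' anti-diagonal loop of A
def pvAntiLoop (x : Int) (m : List (List Int)) (i j : Int) : List (List Int) :=
  if j < x then pvAntiLoop x (pvSetCell m i j (x + j + 1)) (i - 1) (j + 1) else m
termination_by (x - j).toNat
decreasing_by omega

def make_mass (x : Int) : List (List Int) :=
  let result := (PySem.List.pyRange 0 x 1).map
    (fun _mass => (PySem.List.pyRange 0 x 1).map (fun j => j * 0))
  let result := (PySem.List.pyRange 0 x 1).foldl (fun r i => pvSetCell r i i (i + 1)) result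
  let result := pvAntiLoop x result (x - 1) 0
  -- temp = result[0][x-1]; dead loop only reads result and increments temp (exact: int(x/2) = x/2 for the 0 ≤ x inputs Pre_ admits)
  let temp := PySem.List.pyGetD (PySem.List.pyGetD result 0 []) (x - 1) 0
  let _ := (PySem.List.pyRange 0 (x / 2) 1).foldl
    (fun t _i => ((PySem.List.pyGetD result 0 []).reverse).foldl
      (fun t numb => if numb = 0 then t + 1 else t) t) temp
  result

-- ===== PORT B =====
def make_mass_alt (x : Int) : List (List Int) :=
  (PySem.List.pyRange 0 x 1).map (fun r =>
    (PySem.List.pyRange 0 x 1).map (fun c =>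
      if r + c = x - 1 then x + c + 1 else if r = c then r + 1 else 0))

-- ===== PRECONDITION & SPEC =====
-- A raises IndexError at result[0][x-1] whenever x ≤ 0 (the matrix is empty there)
def Pre_make_mass (x : Int) : Prop := 1 ≤ x
instance (x : Int) : Decidable (Pre_make_mass x) := by unfold Pre_make_mass; infer_instance
def pvWitness_make_mass : Int := (3)

def Spec_make_mass (x : Int) (out : List (List Int)) : Prop := out = make_mass_alt x
instance (x : Int) (out : List (List Int)) : Decidable (Spec_make_mass x out) := by unfold Spec_make_mass; infer_instance

-- ===== CLAIM (what is proved, stated in full; the proofs are below) =====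
def Claim_equal_make_mass : Prop := ∀ (x : Int), Dom_make_mass x → Pre_make_mass x → Spec_make_mass x (make_mass x)
-- ===== LEMMAS AND PROOFS =====

-- proof-only view of a matrix cell, with default 0
def pvGet2 (m : List (List Int)) (r c : Nat) : Int := (m.getD r []).getD c 0

def pvShaped (n : Nat) (m : List (List Int)) : Prop :=
  m.length = n ∧ ∀ row ∈ m, row.length = n

lemma pvShaped_setCell {n : Nat} {m : List (List Int)} (hs : pvShaped n m)
    (i j : Nat) (hi : i < n) (v : Int) :
    pvShaped n (pvSetCell m (i : Int) (j : Int) v) := by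
  obtain ⟨hl, hr⟩ := hs
  have hi' : i < m.length := by omega
  refine ⟨by simp [pvSetCell, hl], ?_⟩
  intro row hrow
  unfold pvSetCell at hrow
  simp only [Int.toNat_natCast] at hrow
  rcases List.mem_or_eq_of_mem_set hrow with h | h
  · exact hr _ h
  · subst h
    rw [List.length_set, List.getD_eq_getElem _ _ hi']
    exact hr _ (List.getElem_mem _)

lemma pvGet2_setCell {n : Nat} {m : List (List Int)} (hs : pvShaped n m)
    (i j : Nat) (hi : i < n) (hj : j < n) (v : Int) (r c : Nat) :
    pvGet2 (pvSetCell m (i : Int) (j : Int) v) r c =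
      if r = i ∧ c = j then v else pvGet2 m r c := by
  obtain ⟨hl, hr⟩ := hs
  have hi' : i < m.length := by omega
  have hrowlen : (m.getD i []).length = n := by
    rw [List.getD_eq_getElem _ _ hi']; exact hr _ (List.getElem_mem _)
  unfold pvSetCell pvGet2
  simp only [Int.toNat_natCast]
  by_cases hri : r = i
  · subst hri
    have h1 : (m.set r ((m.getD r []).set j v)).getD r [] = (m.getD r []).set j v := by
      rw [List.getD_eq_getElem _ _ (by simpa using hi')]
      exact List.getElem_set_self _
    rw [h1]
    by_cases hcj : c = j
    · subst hcj
      have h2 : ((m.getD r []).set c v).getD c 0 = v := by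
        rw [List.getD_eq_getElem _ _ (by rw [List.length_set]; omega)]
        exact List.getElem_set_self _
      rw [h2]; simp
    · simp only [hcj, and_false, if_false]
      by_cases hc : c < n
      · have h2 : ((m.getD r []).set j v).getD c 0 = (m.getD r []).getD c 0 := by
          rw [List.getD_eq_getElem _ _ (by rw [List.length_set]; omega),
            List.getElem_set_ne (by omega)]
          exact (List.getD_eq_getElem _ _ (by omega)).symm
        rw [h2]
      · rw [List.getD_eq_default _ _ (by rw [List.length_set]; omega),
          List.getD_eq_default _ _ (by omega)]
  · simp only [hri, false_and, if_false]
    have h1 : (m.set i ((m.getD i []).set j v)).getD r [] = m.getD r [] := by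
      by_cases hrl : r < m.length
      · rw [List.getD_eq_getElem _ _ (by simpa using hrl),
          List.getElem_set_ne (by omega)]
        exact (List.getD_eq_getElem _ _ hrl).symm
      · rw [List.getD_eq_default _ _ (by rw [List.length_set]; omega),
          List.getD_eq_default _ _ (by omega)]
    rw [h1]

-- the initial all-zero matrix reads 0 everywhere (defaults included)
lemma pvGet2_zero (n : Nat) (r c : Nat) :
    pvGet2 (List.replicate n (List.replicate n (0 : Int))) r c = 0 := by
  unfold pvGet2
  by_cases hr : r < n
  · have h1 : (List.replicate n (List.replicate n (0 : Int))).getD r [] = List.replicate n (0 : Int) := by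
      rw [List.getD_eq_getElem _ _ (by simpa using hr)]
      exact List.getElem_replicate _
    rw [h1]
    by_cases hc : c < n
    · rw [List.getD_eq_getElem _ _ (by simpa using hc)]
      exact List.getElem_replicate _
    · exact List.getD_eq_default _ _ (by simpa using hc)
  · have h1 : (List.replicate n (List.replicate n (0 : Int))).getD r [] = [] :=
      List.getD_eq_default _ _ (by simpa using hr)
    rw [h1]
    rfl

lemma pvShaped_zero (n : Nat) :
    pvShaped n (List.replicate n (List.replicate n (0 : Int))) := by
  refine ⟨by simp, ?_⟩
  intro row hrow
  simp [List.eq_of_mem_replicate hrow]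

-- after the diagonal fold over range k
lemma pvDiag_char (n : Nat) (m : List (List Int)) (hs : pvShaped n m)
    (hm : ∀ r c, pvGet2 m r c = 0) (k : Nat) (hk : k ≤ n) :
    pvShaped n ((List.range k).foldl (fun r (i : Nat) => pvSetCell r (i : Int) (i : Int) ((i : Int) + 1)) m) ∧
    ∀ r c, pvGet2 ((List.range k).foldl (fun r (i : Nat) => pvSetCell r (i : Int) (i : Int) ((i : Int) + 1)) m) r c =
      if r = c ∧ r < k then (r : Int) + 1 else 0 := by
  induction k with
  | zero => simpa using ⟨hs, by simpa using hm⟩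
  | succ k ih =>
    obtain ⟨ihs, ihv⟩ := ih (by omega)
    rw [List.range_succ, List.foldl_append, List.foldl_cons, List.foldl_nil]
    refine ⟨pvShaped_setCell ihs k k (by omega) _, ?_⟩
    intro r c
    rw [pvGet2_setCell ihs k k (by omega) (by omega) _ r c, ihv r c]
    by_cases h : r = k ∧ c = k
    · obtain ⟨h1, h2⟩ := h; subst h1; subst h2; simp
    · simp only [h, if_false]
      split_ifs with h1 h2 <;> try rfl
      · omega
      · omega

-- the while loop sets cell (x-1-c, c) to x+c+1 for every column c with j ≤ c < x
lemma pvAnti_char (x : Int) (hx : 1 ≤ x) (n : Nat) (hn : (n : Int) = x)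
    (j : Int) (hj : 0 ≤ j) (m : List (List Int)) (hs : pvShaped n m) :
    pvShaped n (pvAntiLoop x m (x - 1 - j) j) ∧
    ∀ r c : Nat, pvGet2 (pvAntiLoop x m (x - 1 - j) j) r c =
      if j ≤ (c : Int) ∧ (c : Int) < x ∧ (r : Int) = x - 1 - (c : Int) then x + (c : Int) + 1
      else pvGet2 m r c := by
  by_cases hjx : j < x
  · rw [pvAntiLoop, if_pos hjx]
    have hset : pvShaped n (pvSetCell m (x - 1 - j) j (x + j + 1)) := by
      have h := pvShaped_setCell hs (x - 1 - j).toNat j.toNat (by omega) (x + j + 1)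
      rwa [show (((x - 1 - j).toNat : Nat) : Int) = x - 1 - j by omega,
        show ((j.toNat : Nat) : Int) = j by omega] at h
    have step := pvAnti_char x hx n hn (j + 1) (by omega) _ hset
    have harg : x - 1 - j - 1 = x - 1 - (j + 1) := by ring
    constructor
    · rw [harg]; exact step.1
    · intro r c
      rw [harg, step.2 r c]
      have hcell := pvGet2_setCell hs (x - 1 - j).toNat j.toNat (by omega) (by omega) (x + j + 1) r c
      rw [show (((x - 1 - j).toNat : Nat) : Int) = x - 1 - j by omega,
        show ((j.toNat : Nat) : Int) = j by omega] at hcell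
      rw [hcell]
      split_ifs <;> first | rfl | omega
  · rw [pvAntiLoop, if_neg hjx]
    refine ⟨hs, ?_⟩
    intro r c
    split_ifs with h
    · omega
    · rfl
termination_by (x - j).toNat
decreasing_by omega

-- a matrix written as a range-map comprehension, viewed through pvGet2
lemma pvShaped_matrix (n : Nat) (g : Nat → Nat → Int) :
    pvShaped n ((List.range n).map (fun (r : Nat) => (List.range n).map (fun (c : Nat) => g r c))) := by
  refine ⟨by simp, ?_⟩
  intro row hrow
  simp only [List.mem_map] at hrow
  obtain ⟨a, _, rfl⟩ := hrow
  simp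

lemma pvGet2_matrix (n : Nat) (g : Nat → Nat → Int) (r c : Nat) :
    pvGet2 ((List.range n).map (fun (r : Nat) => (List.range n).map (fun (c : Nat) => g r c))) r c =
      if r < n ∧ c < n then g r c else 0 := by
  unfold pvGet2
  by_cases hr : r < n
  · have h1 : ((List.range n).map (fun (r : Nat) => (List.range n).map (fun (c : Nat) => g r c))).getD r []
        = (List.range n).map (fun (c : Nat) => g r c) := by
      rw [List.getD_eq_getElem _ _ (by simpa using hr)]
      simp
    rw [h1]
    by_cases hc : c < n
    · rw [List.getD_eq_getElem _ _ (by simpa using hc)]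
      simp [hr, hc]
    · rw [List.getD_eq_default _ _ (by simpa using hc)]
      simp [hc]
  · have h1 : ((List.range n).map (fun (r : Nat) => (List.range n).map (fun (c : Nat) => g r c))).getD r []
        = [] := List.getD_eq_default _ _ (by simpa using hr)
    rw [h1]
    simp [hr]

-- two n×n-shaped matrices that agree through pvGet2 are equal
lemma pvEq_of_get2 {n : Nat} {A B : List (List Int)} (hA : pvShaped n A) (hB : pvShaped n B)
    (h : ∀ r c, pvGet2 A r c = pvGet2 B r c) : A = B := by
  obtain ⟨hAl, hAr⟩ := hA
  obtain ⟨hBl, hBr⟩ := hB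
  apply List.ext_getElem (by omega)
  intro r h1 h2
  have hrowA : A[r].length = n := hAr _ (List.getElem_mem _)
  have hrowB : B[r].length = n := hBr _ (List.getElem_mem _)
  apply List.ext_getElem (by omega)
  intro c hc1 hc2
  have e1 : A[r][c] = pvGet2 A r c := by
    unfold pvGet2
    rw [List.getD_eq_getElem A _ h1, List.getD_eq_getElem _ _ hc1]
  have e2 : B[r][c] = pvGet2 B r c := by
    unfold pvGet2
    rw [List.getD_eq_getElem B _ h2, List.getD_eq_getElem _ _ hc2]
  rw [e1, e2, h]

-- ===== VERDICT (by name: the statement is the Claim_ definition above) =====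
theorem make_mass_spec : Claim_equal_make_mass := by
  intro x _ hx
  unfold Spec_make_mass
  have hx1 : (1 : Int) ≤ x := hx
  have hnx : ((x.toNat : Nat) : Int) = x := by omega
  have hrange : PySem.List.pyRange 0 x 1 = (List.range x.toNat).map (fun (k : Nat) => (k : Int)) := by
    rw [PySem.List.pyRange_one, show (x - 0).toNat = x.toNat by omega]
    exact List.map_congr_left (fun a _ => by omega)
  have hA : make_mass x = pvAntiLoop x
      ((PySem.List.pyRange 0 x 1).foldl (fun r i => pvSetCell r i i (i + 1))
        ((PySem.List.pyRange 0 x 1).map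
          (fun _mass => (PySem.List.pyRange 0 x 1).map (fun j => j * 0)))) (x - 1) 0 := rfl
  rw [hA, hrange]
  have hz : ((List.range x.toNat).map (fun (k : Nat) => (k : Int))).map
      (fun _mass => ((List.range x.toNat).map (fun (k : Nat) => (k : Int))).map (fun j => j * 0)) =
      List.replicate x.toNat (List.replicate x.toNat (0 : Int)) := by
    simp [List.map_map, Function.comp, List.eq_replicate_iff]
  rw [hz]
  have hB : make_mass_alt x = (List.range x.toNat).map (fun (r : Nat) =>
      (List.range x.toNat).map (fun (c : Nat) =>
        if (r : Int) + (c : Int) = x - 1 then x + (c : Int) + 1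
        else if (r : Int) = (c : Int) then (r : Int) + 1 else 0)) := by
    unfold make_mass_alt
    rw [hrange]
    simp only [List.map_map]
    exact List.map_congr_left (fun r _ => by simp only [Function.comp_apply]; rfl)
  rw [hB]
  rw [show ((List.range x.toNat).map (fun (k : Nat) => (k : Int))).foldl
        (fun r i => pvSetCell r i i (i + 1)) (List.replicate x.toNat (List.replicate x.toNat (0 : Int)))
      = (List.range x.toNat).foldl
        (fun r (i : Nat) => pvSetCell r (i : Int) (i : Int) ((i : Int) + 1))
        (List.replicate x.toNat (List.replicate x.toNat (0 : Int))) from by rw [List.foldl_map]]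
  obtain ⟨dsh, dv⟩ := pvDiag_char x.toNat _ (pvShaped_zero x.toNat) (pvGet2_zero x.toNat) x.toNat le_rfl
  obtain ⟨ash, av⟩ := pvAnti_char x hx1 x.toNat hnx 0 le_rfl _ dsh
  rw [show x - 1 - 0 = x - 1 from by ring] at ash av
  refine pvEq_of_get2 ash (pvShaped_matrix x.toNat _) ?_
  intro r c
  rw [av r c, dv r c, pvGet2_matrix]
  split_ifs <;> first | rfl | omega
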